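-- pv_equiv track=rewrite | github.com/khritish17/DSA-Practice | Meta Coding Puzzles/kaitenzushi.py | getMaximumEatenDishCount
-- ===== SOURCE A (Python) =====
-- from typing import List
-- from collections import deque
--
-- def getMaximumEatenDishCount(N: int, D: List[int], K: int) -> int:
--   # Write your code here
--   eaten = {}
--   eaten_list = deque()
--   length = 0
--   ans = 0
--   for i in range(N):
--     dish = D[i]
--     if dish not in eaten:
--       if length == K:
--         poped = eaten_list.popleft()
--         del eaten[poped]
--         eaten_list.append(dish)
--         ans += 1
--         eaten[dish] = True
--       elif length < K:
--         length += 1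
--         eaten_list.append(dish)
--         ans += 1
--         eaten[dish] = True
--   return ans
-- ===== SOURCE B (Python) =====
-- from typing import List
--
-- def getMaximumEatenDishCount(N: int, D: List[int], K: int) -> int:
--   # last_order[dish] = the ordinal (running count of eaten dishes) at which
--   # dish was last eaten; dish is edible iff it was never eaten or its last
--   # ordinal has fallen out of the recency window of size K.
--   last_order = {}
--   ans = 0
--   for i in range(N):
--     dish = D[i]
--     t = last_order.get(dish)
--     if t is None or t <= ans - K:
--       ans += 1
--       last_order[dish] = ans
--   return ans
-- ===== Notes on version B (the rewrite author's own statement) =====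
-- stated objective: simpler
-- what changed: Replaces the deque window plus membership dict with a single dict mapping each dish to the ordinal at which it was last eaten: a dish is eaten iff it is new or its last ordinal is at most ans-K, which removes the FIFO queue, the popleft and the length bookkeeping entirely.
-- outside the precondition, e.g. on getMaximumEatenDishCount(2, [1, 2], -1): A returns 0, B returns 2
import Mathlib
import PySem

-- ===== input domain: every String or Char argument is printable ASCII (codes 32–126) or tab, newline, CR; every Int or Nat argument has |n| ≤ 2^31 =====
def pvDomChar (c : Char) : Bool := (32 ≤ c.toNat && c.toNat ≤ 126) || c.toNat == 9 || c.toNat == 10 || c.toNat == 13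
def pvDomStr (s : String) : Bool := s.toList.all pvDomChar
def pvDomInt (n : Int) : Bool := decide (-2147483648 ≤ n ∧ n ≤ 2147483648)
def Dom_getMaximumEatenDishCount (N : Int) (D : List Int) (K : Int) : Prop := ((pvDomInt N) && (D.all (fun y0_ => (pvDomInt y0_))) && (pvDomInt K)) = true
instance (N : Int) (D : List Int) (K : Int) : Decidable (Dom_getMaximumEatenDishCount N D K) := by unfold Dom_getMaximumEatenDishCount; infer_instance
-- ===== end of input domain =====

-- B replaces A's deque window + membership dict by one dict of last-eaten ordinals (simpler: no queue, no popleft, no length bookkeeping).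

-- ===== PORT A =====
-- state: (eaten, eaten_list, length, ans)
def pvStepA (D : List Int) (K : Int) (s : PySem.Dict Int Bool × List Int × Int × Int) (i : Int) :
    PySem.Dict Int Bool × List Int × Int × Int :=
  match PySem.List.pyGet? D i with
  | none => s            -- D[i] raises IndexError here (excluded by Pre_)
  | some dish =>
    if s.1.contains dish then s
    else if s.2.2.1 = K then
      match s.2.1 with
      | [] => s          -- popleft on the empty deque raises IndexError (excluded by Pre_)
      | poped :: rest => ((s.1.erase poped).insert dish true, rest ++ [dish], s.2.2.1, s.2.2.2 + 1)
    else if s.2.2.1 < K then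
      (s.1.insert dish true, s.2.1 ++ [dish], s.2.2.1 + 1, s.2.2.2 + 1)
    else s

def getMaximumEatenDishCount (N : Int) (D : List Int) (K : Int) : Int :=
  ((PySem.List.pyRange 0 N 1).foldl (pvStepA D K) (PySem.Dict.empty, ([], (0, 0)))).2.2.2

-- ===== PORT B =====
-- state: (last_order, ans)
def pvStepB (D : List Int) (K : Int) (s : PySem.Dict Int Int × Int) (i : Int) :
    PySem.Dict Int Int × Int :=
  match PySem.List.pyGet? D i with
  | none => s            -- D[i] raises IndexError here (excluded by Pre_)
  | some dish =>
    match s.1.get? dish with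
    | none => (s.1.insert dish (s.2 + 1), s.2 + 1)
    | some t => if t ≤ s.2 - K then (s.1.insert dish (s.2 + 1), s.2 + 1) else s

def getMaximumEatenDishCount_alt (N : Int) (D : List Int) (K : Int) : Int :=
  ((PySem.List.pyRange 0 N 1).foldl (pvStepB D K) (PySem.Dict.empty, 0)).2

-- ===== PRECONDITION & SPEC =====
-- Pre_ excludes N > len(D) (IndexError on D[i]) and nonpositive K: for K = 0 A raises
-- IndexError popping the empty deque, and for K < 0 the recency window is degenerate —
-- A's two branches are unreachable so it returns 0, while B (empty window) eats every
-- dish; both are defensible on that corner, so it is outside the claim.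
def Pre_getMaximumEatenDishCount (N : Int) (D : List Int) (K : Int) : Prop :=
  N ≤ (D.length : Int) ∧ (1 ≤ K ∨ N ≤ 0)
instance (N : Int) (D : List Int) (K : Int) : Decidable (Pre_getMaximumEatenDishCount N D K) := by
  unfold Pre_getMaximumEatenDishCount; infer_instance

def pvWitness_getMaximumEatenDishCount : Int × List Int × Int := (3, ([1, 2, 1], 1))

def Spec_getMaximumEatenDishCount (N : Int) (D : List Int) (K : Int) (out : Int) : Prop := out = getMaximumEatenDishCount_alt N D K
instance (N : Int) (D : List Int) (K : Int) (out : Int) : Decidable (Spec_getMaximumEatenDishCount N D K out) := by unfold Spec_getMaximumEatenDishCount; infer_instance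

-- ===== CLAIM (what is proved, stated in full; the proofs are below) =====
def Claim_equal_getMaximumEatenDishCount : Prop := ∀ (N : Int) (D : List Int) (K : Int), Dom_getMaximumEatenDishCount N D K → Pre_getMaximumEatenDishCount N D K → Spec_getMaximumEatenDishCount N D K (getMaximumEatenDishCount N D K)

-- ===== LEMMAS AND PROOFS =====

-- The simulation invariant tying A's state (eaten, lst, len, a) to B's state (lo, a):
-- the window lst holds exactly the dishes with last-eaten ordinal in (a - len, a],
-- listed in eating order, and every dish outside it has ordinal ≤ a - K in lo.
def pvInv (K : Int) (eaten : PySem.Dict Int Bool) (lst : List Int) (len a : Int)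
    (lo : PySem.Dict Int Int) : Prop :=
  0 ≤ a ∧ len = min a K ∧ ((lst.length : Int) = len) ∧
  (∀ (j : Nat) (hj : j < lst.length), lo.get? lst[j] = some (a - len + 1 + j)) ∧
  (∀ d : Int, eaten.contains d = true ↔ d ∈ lst) ∧
  (∀ d t : Int, d ∉ lst → lo.get? d = some t → t ≤ a - K)

theorem pv_contains_erase (d : PySem.Dict Int Bool) (k k' : Int) :
    ((d.erase k).contains k' = true) ↔ (k' ≠ k ∧ d.contains k' = true) := by
  simp only [PySem.Dict.erase, PySem.Dict.contains, List.any_eq_true, List.mem_filter,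
    Bool.not_eq_true', beq_eq_false_iff_ne, beq_iff_eq]
  constructor
  · rintro ⟨p, ⟨hp, hne⟩, hk⟩
    exact ⟨hk ▸ hne, p, hp, hk⟩
  · rintro ⟨hne, p, hp, hk⟩
    exact ⟨p, ⟨hp, hk ▸ hne⟩, hk⟩

theorem pvStep_core (K : Int) (hK : 1 ≤ K) (D : List Int) (i : Int)
    (eaten : PySem.Dict Int Bool) (lst : List Int) (len a : Int) (lo : PySem.Dict Int Int)
    (h : pvInv K eaten lst len a lo) :
    ∃ eaten' lst' len' lo',
      pvStepA D K (eaten, (lst, (len, a))) i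
        = (eaten', (lst', (len', (pvStepB D K (lo, a) i).2))) ∧
      pvInv K eaten' lst' len' ((pvStepB D K (lo, a) i).2) lo' ∧
      (pvStepB D K (lo, a) i).1 = lo' := by
  obtain ⟨ha, hmin, hlength, hord, hmem, hout⟩ := h
  cases hD : PySem.List.pyGet? D i with
  | none =>
    have hB : pvStepB D K (lo, a) i = (lo, a) := by simp [pvStepB, hD]
    rw [hB]
    exact ⟨eaten, lst, len, lo, by simp [pvStepA, hD],
      ⟨ha, hmin, hlength, hord, hmem, hout⟩, rfl⟩
  | some dish =>
    by_cases hcont : eaten.contains dish = true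
    · -- dish in window: both skip
      obtain ⟨j, hj, hdish⟩ := List.mem_iff_getElem.mp ((hmem dish).mp hcont)
      have hgd : lo.get? dish = some (a - len + 1 + j) := by rw [← hdish]; exact hord j hj
      have hnot : ¬ (a - len + 1 + (j : Int) ≤ a - K) := by
        have : len ≤ K := by omega
        omega
      refine ⟨eaten, lst, len, lo, ?_, ?_, ?_⟩
      · simp [pvStepA, pvStepB, hD, hcont, hgd, hnot]
      · simp only [pvStepB, hD, hgd]
        rw [if_neg hnot]
        exact ⟨ha, hmin, hlength, hord, hmem, hout⟩
      · simp [pvStepB, hD, hgd, hnot]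
    · -- dish not in window: both eat
      have hdlst : dish ∉ lst := fun hm => hcont ((hmem dish).mpr hm)
      have hB : pvStepB D K (lo, a) i = (lo.insert dish (a + 1), a + 1) := by
        cases hlo : lo.get? dish with
        | none => simp [pvStepB, hD, hlo]
        | some t =>
          have : t ≤ a - K := hout dish t hdlst hlo
          simp [pvStepB, hD, hlo, this]
      rw [hB]
      by_cases hlen : len = K
      · -- full window: pop the oldest
        cases lst with
        | nil => exfalso; simp at hlength; omega
        | cons poped rest =>
          have hA : pvStepA D K (eaten, (poped :: rest, (len, a))) i
              = ((eaten.erase poped).insert dish true, (rest ++ [dish], (len, a + 1))) := by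
            simp [pvStepA, hD, hcont, hlen]
          have hplen : ((rest.length : Int) + 1 = K) := by
            simp at hlength; omega
          have hpo : lo.get? poped = some (a - len + 1) := by
            have := hord 0 (by simp)
            simpa using this
          have hpr : poped ∉ rest := by
            intro hmemr
            obtain ⟨j, hjr, hje⟩ := List.mem_iff_getElem.mp hmemr
            have h2 := hord (j + 1) (by simpa using Nat.succ_lt_succ hjr)
            rw [List.getElem_cons_succ, hje, hpo] at h2
            have := Option.some.inj h2
            omega
          have hpd : poped ≠ dish := by
            intro he; exact hdlst (he ▸ List.mem_cons_self)
          refine ⟨(eaten.erase poped).insert dish true, rest ++ [dish], len,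
            lo.insert dish (a + 1), by simpa using hA, ?_, rfl⟩
          refine ⟨by omega, by omega, by simp; omega, ?_, ?_, ?_⟩
          · -- ordinals of the new window
            intro j hj
            simp only [List.length_append, List.length_cons, List.length_nil] at hj
            by_cases hjr : j < rest.length
            · rw [List.getElem_append_left hjr]
              have hrd : rest[j] ≠ dish := by
                intro he; exact hdlst (he ▸ List.mem_cons_of_mem _ (List.getElem_mem hjr))
              rw [PySem.Dict.get?_insert_of_ne _ _ hrd]
              have := hord (j + 1) (by simpa using Nat.succ_lt_succ hjr)
              rw [List.getElem_cons_succ] at this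
              rw [this]
              congr 1
              omega
            · have hje : j = rest.length := by omega
              subst hje
              rw [List.getElem_append_right (by omega)]
              simp only [Nat.sub_self, List.getElem_singleton]
              rw [PySem.Dict.get?_insert_self]
              congr 1
              omega
          · -- membership in the new window
            intro d
            by_cases hdd : d = dish
            · subst hdd
              simp
            · rw [PySem.Dict.contains_insert]
              have : (d == dish) = false := by simp [hdd]
              rw [this, Bool.false_or]
              rw [pv_contains_erase]
              by_cases hdp : d = poped
              · subst hdp
                simp [hpr, hdd]
              · rw [hmem d]
                simp [hdp, hdd]
          · -- dishes outside the new window are stale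
            intro d t hdnm hget
            have hdd : d ≠ dish := by
              intro he; subst he; exact hdnm (by simp)
            rw [PySem.Dict.get?_insert_of_ne _ _ hdd] at hget
            by_cases hdp : d = poped
            · subst hdp
              rw [hpo] at hget
              have := Option.some.inj hget
              omega
            · have : d ∉ poped :: rest := by
                intro hm
                rcases List.mem_cons.mp hm with h1 | h1
                · exact hdp h1
                · exact hdnm (List.mem_append_left _ h1)
              have := hout d t this hget
              omega
      · -- window not yet full: len < K, append
        have hlt : len < K := by omega
        have hA : pvStepA D K (eaten, (lst, (len, a))) i
            = (eaten.insert dish true, (lst ++ [dish], (len + 1, a + 1))) := by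
          simp [pvStepA, hD, hcont, hlen, hlt]
        refine ⟨eaten.insert dish true, lst ++ [dish], len + 1,
          lo.insert dish (a + 1), by simpa using hA, ?_, rfl⟩
        have hla : len = a := by omega
        refine ⟨by omega, by omega, by simp; omega, ?_, ?_, ?_⟩
        · intro j hj
          simp only [List.length_append, List.length_cons, List.length_nil] at hj
          by_cases hjr : j < lst.length
          · rw [List.getElem_append_left hjr]
            have hrd : lst[j] ≠ dish := by
              intro he; exact hdlst (he ▸ List.getElem_mem hjr)
            rw [PySem.Dict.get?_insert_of_ne _ _ hrd, hord j hjr]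
            congr 1
            omega
          · have hje : j = lst.length := by omega
            subst hje
            rw [List.getElem_append_right (by omega)]
            simp only [Nat.sub_self, List.getElem_singleton]
            rw [PySem.Dict.get?_insert_self]
            congr 1
            omega
        · intro d
          by_cases hdd : d = dish
          · subst hdd
            simp
          · rw [PySem.Dict.contains_insert]
            have : (d == dish) = false := by simp [hdd]
            rw [this, Bool.false_or, hmem d]
            simp [hdd]
        · intro d t hdnm hget
          have hdd : d ≠ dish := by
            intro he; subst he; exact hdnm (by simp)
          rw [PySem.Dict.get?_insert_of_ne _ _ hdd] at hget
          have : d ∉ lst := fun h1 => hdnm (List.mem_append_left _ h1)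
          have := hout d t this hget
          omega

theorem pvFold_agree (K : Int) (hK : 1 ≤ K) (D : List Int) :
    ∀ (idxs : List Int) (eaten : PySem.Dict Int Bool) (lst : List Int) (len a : Int)
      (lo : PySem.Dict Int Int), pvInv K eaten lst len a lo →
      (idxs.foldl (pvStepA D K) (eaten, (lst, (len, a)))).2.2.2
        = (idxs.foldl (pvStepB D K) (lo, a)).2 := by
  intro idxs
  induction idxs with
  | nil => intro _ _ _ _ _ _; rfl
  | cons i rest ih =>
    intro eaten lst len a lo h
    obtain ⟨eaten', lst', len', lo', hA, hInv, hlo⟩ := pvStep_core K hK D i eaten lst len a lo h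
    simp only [List.foldl_cons]
    rw [hA]
    have hBsplit : pvStepB D K (lo, a) i = (lo', (pvStepB D K (lo, a) i).2) := by
      rw [← hlo]
    rw [hBsplit]
    exact ih eaten' lst' len' ((pvStepB D K (lo, a) i).2) lo' hInv

theorem pvInv_init (K : Int) (hK : 1 ≤ K) :
    pvInv K PySem.Dict.empty [] 0 0 PySem.Dict.empty := by
  refine ⟨le_refl 0, by omega, rfl, ?_, ?_, ?_⟩
  · intro j hj; simp at hj
  · intro d; simp [PySem.Dict.contains_empty]
  · intro d t _ hget; simp [PySem.Dict.get?_empty] at hget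

-- ===== VERDICT (by name: the statement is the Claim_ definition above) =====
theorem getMaximumEatenDishCount_spec : Claim_equal_getMaximumEatenDishCount := by
  intro N D K _ hPre
  unfold Spec_getMaximumEatenDishCount getMaximumEatenDishCount getMaximumEatenDishCount_alt
  rcases hPre with ⟨_, hK | hN⟩
  · exact pvFold_agree K hK D _ _ _ _ _ _ (pvInv_init K hK)
  · rw [PySem.List.pyRange_one_eq_nil (by omega)]
    rfl
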